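-- pv_equiv track=rewrite | github.com/zpleum/Hyprx | plugins/commands/scan.py | wow
-- ===== SOURCE A (Python) =====
-- def wow(ip12xxx):
--     parts = ip12xxx.split('.')
--     if len(parts) != 4: return [ip12xxx]
--
--     ranges = []
--     for part in parts:
--         if part == '*': ranges.append(range(1, 256))
--         else: ranges.append([int(part)])
--
--     ips = [f"{i}.{j}.{k}.{l}" for i in ranges[0] for j in ranges[1] for k in ranges[2] for l in ranges[3]]
--     return ips
-- ===== SOURCE B (Python) =====
-- def wow(ip12xxx):
--     parts = ip12xxx.split('.')
--     if len(parts) != 4: return [ip12xxx]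
--
--     ranges = [range(1, 256) if part == '*' else [int(part)] for part in parts]
--
--     partials = [str(v) for v in ranges[0]]
--     for r in ranges[1:]:
--         partials = [pre + '.' + str(v) for pre in partials for v in r]
--     return partials
-- ===== Notes on version B (the rewrite author's own statement) =====
-- stated objective: alternative
-- what changed: The fixed 4-deep nested comprehension is replaced by a fold over the ranges list that incrementally extends a list of partial IP strings, so the output is built left-to-right instead of by one 4-level Cartesian comprehension.
import Mathlib
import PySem

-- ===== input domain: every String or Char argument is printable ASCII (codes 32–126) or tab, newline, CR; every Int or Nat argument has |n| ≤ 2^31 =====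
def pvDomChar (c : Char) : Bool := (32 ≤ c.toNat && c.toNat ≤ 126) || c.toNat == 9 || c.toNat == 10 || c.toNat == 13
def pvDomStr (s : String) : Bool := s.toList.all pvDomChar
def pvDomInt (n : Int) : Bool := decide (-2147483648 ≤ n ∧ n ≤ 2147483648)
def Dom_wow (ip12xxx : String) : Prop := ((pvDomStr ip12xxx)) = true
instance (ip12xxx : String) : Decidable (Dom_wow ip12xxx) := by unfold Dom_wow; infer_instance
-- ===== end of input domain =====

-- B replaces A's fixed 4-deep Cartesian comprehension by a fold over the ranges list that
-- incrementally extends partial IP strings (alternative decomposition, same cost).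

-- ===== PORT A =====
-- int(part) that Pre_ guarantees succeeds; the .getD 0 default is never reached inside Pre_
def pvParseRange (part : String) : List Int :=
  if part = "*" then PySem.List.pyRange 1 256 1
  else [(PySem.Int.ofStr? part).getD 0]

def wow (ip12xxx : String) : List String :=
  let parts := (PySem.Str.split? ip12xxx ".").getD []
  if parts.length ≠ 4 then [ip12xxx]
  else
    let ranges := parts.foldl (fun acc part => acc ++ [pvParseRange part]) []
    (ranges.getD 0 []).flatMap fun i =>
      (ranges.getD 1 []).flatMap fun j =>
        (ranges.getD 2 []).flatMap fun k =>
          (ranges.getD 3 []).map fun l =>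
            PySem.Int.toStr i ++ "." ++ PySem.Int.toStr j ++ "." ++
              PySem.Int.toStr k ++ "." ++ PySem.Int.toStr l

-- ===== PORT B =====
def wow_alt (ip12xxx : String) : List String :=
  let parts := (PySem.Str.split? ip12xxx ".").getD []
  if parts.length ≠ 4 then [ip12xxx]
  else
    let ranges := parts.map pvParseRange
    match ranges with
    | [] => []
    | r0 :: rest =>
      rest.foldl
        (fun partials r =>
          partials.flatMap fun pre => r.map fun v => pre ++ "." ++ PySem.Int.toStr v)
        (r0.map PySem.Int.toStr)

-- ===== PRECONDITION & SPEC =====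
-- Pre_ excludes exactly the inputs where Python's int(part) raises ValueError
def Pre_wow (ip12xxx : String) : Prop :=
  ((PySem.Str.split? ip12xxx ".").getD []).length ≠ 4 ∨
    ∀ p ∈ (PySem.Str.split? ip12xxx ".").getD [], p = "*" ∨ (PySem.Int.ofStr? p).isSome
instance (ip12xxx : String) : Decidable (Pre_wow ip12xxx) := by unfold Pre_wow; infer_instance

def pvWitness_wow : String := "1.*.3.4"

def Spec_wow (ip12xxx : String) (out : List String) : Prop := out = wow_alt ip12xxx
instance (ip12xxx : String) (out : List String) : Decidable (Spec_wow ip12xxx out) := by unfold Spec_wow; infer_instance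

-- ===== CLAIM (what is proved, stated in full; the proofs are below) =====
def Claim_equal_wow : Prop := ∀ (ip12xxx : String), Dom_wow ip12xxx → Pre_wow ip12xxx → Spec_wow ip12xxx (wow ip12xxx)

-- ===== LEMMAS AND PROOFS =====

-- ===== VERDICT (by name: the statement is the Claim_ definition above) =====
theorem wow_spec : Claim_equal_wow := by
  intro ip _ _
  unfold Spec_wow wow wow_alt
  simp only
  rcases h4 : (PySem.Str.split? ip ".").getD [] with _ | ⟨a, _ | ⟨b, _ | ⟨c, _ | ⟨d, _ | ⟨e, rest⟩⟩⟩⟩⟩ <;>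
    simp_all [List.foldl, List.flatMap_map, List.flatMap_assoc, String.append_assoc]
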